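-- pv_equiv track=rewrite | github.com/ssunnykku/codingtest-study | sun_hee/23.7/문제1_n^2 배열 자르기.py | solution
-- ===== SOURCE A (Python) =====
-- def solution(n, left, right):
--     standard = list(range(1,n+1))
--     answer = []
--     # 기준인덱스 구하기 (첫 줄)
--     for i in range(left,right+1):
--         index = i%n
--         line = i//n+1
--         if standard[index] > line:
--             answer.append(standard[index])
--         else:
--             answer.append(line)
--
--     return answer
-- ===== SOURCE B (Python) =====
-- def solution(n, left, right):
--     # Emit the answer row-block by row-block: row r of the grid is
--     # (r+1 repeated r+1 times) followed by r+2, ..., n, so the slice of each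
--     # row is a constant run plus an arithmetic run, extended wholesale.
--     if right < left:
--         return []
--     out = []
--     for r in range(left // n, right // n + 1):
--         lo = max(left, r * n) - r * n
--         hi = min(right, r * n + n - 1) - r * n
--         flat_end = min(hi, r)
--         if lo <= flat_end:
--             out.extend([r + 1] * (flat_end - lo + 1))
--         ramp_start = max(lo, r + 1)
--         if ramp_start <= hi:
--             out.extend(range(ramp_start + 1, hi + 2))
--     return out
-- ===== Notes on version B (the rewrite author's own statement) =====
-- stated objective: faster
-- what changed: B replaces A's per-index loop over a precomputed n-element lookup list by a row-block construction: for each grid row meeting [left,right] it extends the output with the row's constant run [r+1]*k and its arithmetic run range(ramp_start+1, hi+2), avoiding both the O(n) list build and the per-element Python-level loop.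
import Mathlib
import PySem

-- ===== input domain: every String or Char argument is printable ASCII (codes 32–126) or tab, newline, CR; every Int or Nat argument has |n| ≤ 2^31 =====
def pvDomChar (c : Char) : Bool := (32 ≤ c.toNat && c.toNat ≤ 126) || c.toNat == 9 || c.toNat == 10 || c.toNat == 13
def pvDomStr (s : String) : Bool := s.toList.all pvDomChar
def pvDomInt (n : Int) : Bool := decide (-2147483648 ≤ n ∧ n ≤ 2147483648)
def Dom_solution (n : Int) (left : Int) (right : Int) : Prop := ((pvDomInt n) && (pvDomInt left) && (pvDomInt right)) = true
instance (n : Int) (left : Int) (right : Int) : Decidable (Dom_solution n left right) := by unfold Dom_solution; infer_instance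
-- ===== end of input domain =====

-- B replaces A's per-index lookup loop by emitting each grid row's slice as a
-- constant run plus an arithmetic run, skipping the O(n) lookup-list build (objective: faster).


-- ===== PORT A =====
-- literal port of A: build standard = list(range(1,n+1)), then for each i in
-- range(left,right+1) append standard[i%n] or i//n+1, whichever is larger.
-- standard[i%n] is PySem.List.pyGet?; it is none (Python IndexError) exactly on
-- inputs Pre_solution excludes, where this port uses getD 0.
def solution (n : Int) (left : Int) (right : Int) : List Int :=
  let standard := PySem.List.pyRange 1 (n + 1) 1
  (PySem.List.pyRange left (right + 1) 1).foldl
    (fun answer i =>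
      let index := PySem.Int.mod i n
      let line := PySem.Int.floordiv i n + 1
      if (PySem.List.pyGet? standard index).getD 0 > line then
        answer ++ [(PySem.List.pyGet? standard index).getD 0]
      else
        answer ++ [line]) []

-- ===== PORT B =====
-- port of Source B: for each row r of the grid that meets [left,right], extend the
-- output with the row's constant run ([r+1] * k) and its arithmetic run
-- (range(ramp_start+1, hi+2)).
def solution_alt (n : Int) (left : Int) (right : Int) : List Int :=
  if right < left then []
  else
    (PySem.List.pyRange (PySem.Int.floordiv left n) (PySem.Int.floordiv right n + 1) 1).foldl
      (fun out r =>
        let lo := max left (r * n) - r * n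
        let hi := min right (r * n + n - 1) - r * n
        let flatEnd := min hi r
        let out1 := if lo ≤ flatEnd then out ++ List.replicate (flatEnd - lo + 1).toNat (r + 1) else out
        let rampStart := max lo (r + 1)
        if rampStart ≤ hi then out1 ++ PySem.List.pyRange (rampStart + 1) (hi + 2) 1 else out1)
      []

-- ===== PRECONDITION & SPEC =====
-- Pre_ excludes exactly the inputs where A raises: a nonempty index range with
-- n ≤ 0 (ZeroDivisionError for n = 0, IndexError into the empty list for n < 0).
def Pre_solution (n : Int) (left : Int) (right : Int) : Prop := right < left ∨ 0 < n
instance (n : Int) (left : Int) (right : Int) : Decidable (Pre_solution n left right) := by unfold Pre_solution; infer_instance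
def pvWitness_solution : Int × Int × Int := (3, 2, 5)
def Spec_solution (n : Int) (left : Int) (right : Int) (out : List Int) : Prop := out = solution_alt n left right
instance (n : Int) (left : Int) (right : Int) (out : List Int) : Decidable (Spec_solution n left right out) := by unfold Spec_solution; infer_instance

-- ===== CLAIM (what is proved, stated in full; the proofs are below) =====
def Claim_equal_solution : Prop := ∀ (n : Int) (left : Int) (right : Int), Dom_solution n left right → Pre_solution n left right → Spec_solution n left right (solution n left right)

-- ===== LEMMAS AND PROOFS =====

-- the value at flattened index i (for 0 < n, as A computes it)
def pvF (n i : Int) : Int := max (PySem.Int.mod i n + 1) (PySem.Int.floordiv i n + 1)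

-- the block B emits for row r (guards dropped: empty runs are empty lists)
def pvBlk (n left right r : Int) : List Int :=
  List.replicate (min (min right (r * n + n - 1) - r * n) r - (max left (r * n) - r * n) + 1).toNat (r + 1)
    ++ PySem.List.pyRange (max (max left (r * n) - r * n) (r + 1) + 1) (min right (r * n + n - 1) - r * n + 2) 1

-- standard[i % n] = i % n + 1 for n > 0
theorem standard_get (n i : Int) (hn : 0 < n) :
    (PySem.List.pyGet? (PySem.List.pyRange 1 (n + 1) 1) (PySem.Int.mod i n)).getD 0
      = PySem.Int.mod i n + 1 := by
  rw [PySem.Int.mod_eq_emod_of_pos hn]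
  have h0 : 0 ≤ i % n := Int.emod_nonneg i (by omega)
  have h1 : i % n < n := Int.emod_lt_of_pos i hn
  rw [PySem.List.pyRange_one, PySem.List.pyGet?_of_nonneg _ h0]
  have hk : (i % n).toNat < (n + 1 - 1).toNat := by omega
  rw [List.getElem?_map, List.getElem?_range hk]
  simp
  omega

-- A is the closed form pvF mapped over the index range
theorem A_eq_map (n left right : Int) (hn : 0 < n) :
    solution n left right = (PySem.List.pyRange left (right + 1) 1).map (pvF n) := by
  unfold solution
  have hfun :
      (fun (answer : List Int) (i : Int) =>
        let index := PySem.Int.mod i n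
        let line := PySem.Int.floordiv i n + 1
        if (PySem.List.pyGet? (PySem.List.pyRange 1 (n + 1) 1) index).getD 0 > line then
          answer ++ [(PySem.List.pyGet? (PySem.List.pyRange 1 (n + 1) 1) index).getD 0]
        else
          answer ++ [line])
      = (fun (answer : List Int) (i : Int) => answer ++ [pvF n i]) := by
    funext answer i
    simp only [standard_get n i hn, pvF]
    split <;> congr 1 <;> simp <;> omega
  simp only [hfun]
  rw [PySem.List.foldl_append_singleton_eq_map]
  simp

-- floordiv and mod inside row r
theorem floordiv_in_row (n r i : Int) (hn : 0 < n) (h1 : r * n ≤ i) (h2 : i < r * n + n) :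
    PySem.Int.floordiv i n = r := by
  rw [PySem.Int.floordiv_eq_iff_of_pos hn]
  constructor <;> nlinarith

theorem mod_in_row (n r i : Int) (hn : 0 < n) (h1 : r * n ≤ i) (h2 : i < r * n + n) :
    PySem.Int.mod i n = i - r * n := by
  have := PySem.Int.floordiv_mul_add_mod i n
  rw [floordiv_in_row n r i hn h1 h2] at this
  omega

-- shifting an arithmetic range
theorem map_add_pyRange (a b c : Int) :
    (PySem.List.pyRange a b 1).map (fun i => i + c) = PySem.List.pyRange (a + c) (b + c) 1 := by
  rw [PySem.List.pyRange_one, PySem.List.pyRange_one, List.map_map]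
  have : (b + c - (a + c)).toNat = (b - a).toNat := by omega
  rw [this]
  apply List.map_congr_left
  intro k _
  simp
  omega

-- one row: the slice [a, b] of row r (inside the row), mapped through pvF,
-- is the constant run followed by the arithmetic run
theorem row_block (n r a b : Int) (hn : 0 < n) (ha : r * n ≤ a) (hb : b ≤ r * n + n - 1) :
    (PySem.List.pyRange a (b + 1) 1).map (pvF n)
      = List.replicate (min (b - r * n) r - (a - r * n) + 1).toNat (r + 1)
          ++ PySem.List.pyRange (max (a - r * n) (r + 1) + 1) (b - r * n + 2) 1 := by
  by_cases hab : b + 1 ≤ a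
  · rw [PySem.List.pyRange_one_eq_nil hab, PySem.List.pyRange_one_eq_nil (by omega)]
    have : (min (b - r * n) r - (a - r * n) + 1).toNat = 0 := by omega
    rw [this]
    simp
  · -- a ≤ b; split at p
    have hab' : a ≤ b := by omega
    set p := max a (min (b + 1) (r * n + r + 1)) with hp
    have h1 : a ≤ p := le_max_left _ _
    have h2 : p ≤ b + 1 := by omega
    rw [PySem.List.pyRange_one_append a p (b + 1) h1 h2, List.map_append]
    -- constant part
    have hconst : (PySem.List.pyRange a p 1).map (pvF n)
        = List.replicate (min (b - r * n) r - (a - r * n) + 1).toNat (r + 1) := by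
      have : (PySem.List.pyRange a p 1).map (pvF n)
          = (PySem.List.pyRange a p 1).map (fun _ => r + 1) := by
        apply List.map_congr_left
        intro i hi
        rw [PySem.List.mem_pyRange_one] at hi
        have hlt : i < r * n + n := by omega
        unfold pvF
        rw [mod_in_row n r i hn (by omega) hlt, floordiv_in_row n r i hn (by omega) hlt]
        omega
      rw [this, List.map_const', PySem.List.length_pyRange_one]
      congr 1
      omega
    rw [hconst]
    congr 1
    -- arithmetic part
    by_cases hemp : b + 1 ≤ p
    · rw [PySem.List.pyRange_one_eq_nil hemp, PySem.List.pyRange_one_eq_nil (by omega)]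
      simp
    · have hhp : r * n + r + 1 ≤ p := by omega
      have : (PySem.List.pyRange p (b + 1) 1).map (pvF n)
          = (PySem.List.pyRange p (b + 1) 1).map (fun i => i + (1 - r * n)) := by
        apply List.map_congr_left
        intro i hi
        rw [PySem.List.mem_pyRange_one] at hi
        have hlt : i < r * n + n := by omega
        unfold pvF
        rw [mod_in_row n r i hn (by omega) hlt, floordiv_in_row n r i hn (by omega) hlt]
        omega
      rw [this, map_add_pyRange]
      congr 1 <;> omega

-- the whole range decomposes into row blocks (induction on the number of rows)
theorem rows_decomp (n right : Int) (hn : 0 < n) :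
    ∀ (k : Nat) (l : Int), l ≤ right →
      (PySem.Int.floordiv right n - PySem.Int.floordiv l n).toNat = k →
      (PySem.List.pyRange l (right + 1) 1).map (pvF n)
        = (PySem.List.pyRange (PySem.Int.floordiv l n) (PySem.Int.floordiv right n + 1) 1).flatMap
            (pvBlk n l right) := by
  intro k
  induction k with
  | zero =>
    intro l hl hk
    set r0 := PySem.Int.floordiv l n with hr0
    have hb := (PySem.Int.floordiv_eq_iff_of_pos hn (a := l) (q := r0)).1 hr0.symm
    have hbr := (PySem.Int.floordiv_eq_iff_of_pos hn (a := right) (q := PySem.Int.floordiv right n)).1 rfl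
    have hexp : (r0 + 1) * n = r0 * n + n := by ring
    have hr1 : PySem.Int.floordiv right n = r0 := by
      have h1 : r0 ≤ PySem.Int.floordiv right n := by
        by_contra h
        have hstep : (PySem.Int.floordiv right n + 1) * n ≤ r0 * n :=
          mul_le_mul_of_nonneg_right (by omega) (by omega)
        omega
      omega
    rw [hr1]
    rw [PySem.List.pyRange_one_singleton]
    simp only [List.flatMap_cons, List.flatMap_nil, List.append_nil]
    unfold pvBlk
    have hmaxl : max l (r0 * n) = l := by omega
    have hminr : min right (r0 * n + n - 1) = right := by
      rw [hr1] at hbr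
      omega
    rw [hmaxl, hminr]
    exact row_block n r0 l right hn (by omega) (by rw [hr1] at hbr; omega)
  | succ k ih =>
    intro l hl hk
    set r0 := PySem.Int.floordiv l n with hr0
    set r1 := PySem.Int.floordiv right n with hr1
    have hb := (PySem.Int.floordiv_eq_iff_of_pos hn (a := l) (q := r0)).1 hr0.symm
    have hbr := (PySem.Int.floordiv_eq_iff_of_pos hn (a := right) (q := r1)).1 hr1.symm
    have hexp : (r0 + 1) * n = r0 * n + n := by ring
    have hlt : r0 < r1 := by omega
    set m := (r0 + 1) * n with hm
    have hml : l < m := by omega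
    have hmr : m ≤ right := by
      have hstep : (r0 + 1) * n ≤ r1 * n := mul_le_mul_of_nonneg_right (by omega) (by omega)
      omega
    -- split the index range at the row boundary m
    rw [PySem.List.pyRange_one_append l m (right + 1) (by omega) (by omega), List.map_append]
    -- first chunk is row r0's full tail
    have hfirst : (PySem.List.pyRange l m 1).map (pvF n) = pvBlk n l right r0 := by
      unfold pvBlk
      have hmaxl : max l (r0 * n) = l := by omega
      have hminr : min right (r0 * n + n - 1) = r0 * n + n - 1 := by omega
      rw [hmaxl, hminr]
      have : m = (r0 * n + n - 1) + 1 := by omega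
      rw [this]
      exact row_block n r0 l (r0 * n + n - 1) hn (by omega) (by omega)
    -- rest by induction at l' = m
    have hfm : PySem.Int.floordiv m n = r0 + 1 := by
      rw [PySem.Int.floordiv_eq_iff_of_pos hn]
      constructor <;> nlinarith
    have hrest := ih m (by omega) (by rw [hfm]; omega)
    rw [hfm] at hrest
    -- blocks for rows > r0 do not depend on whether we start at l or at m
    have hsame : (PySem.List.pyRange (r0 + 1) (r1 + 1) 1).flatMap (pvBlk n m right)
        = (PySem.List.pyRange (r0 + 1) (r1 + 1) 1).flatMap (pvBlk n l right) := by
      apply List.flatMap_congr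
      intro r hr
      rw [PySem.List.mem_pyRange_one] at hr
      unfold pvBlk
      have hmn : m ≤ r * n := by
        have := mul_le_mul_of_nonneg_right (show r0 + 1 ≤ r by omega) (show (0:Int) ≤ n by omega)
        omega
      rw [max_eq_right hmn, max_eq_right (by omega : l ≤ r * n)]
    rw [hfirst, hrest, hsame,
      PySem.List.pyRange_one_cons (show r0 < r1 + 1 by omega), List.flatMap_cons]

theorem solution_spec : Claim_equal_solution := by
  intro n left right _ hpre
  unfold Spec_solution
  by_cases hle : right < left
  · unfold solution solution_alt
    rw [PySem.List.pyRange_one_eq_nil (by omega : right + 1 ≤ left)]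
    simp [hle]
  · have hn : 0 < n := by
      rcases hpre with h | h
      · omega
      · exact h
    rw [A_eq_map n left right hn]
    unfold solution_alt
    rw [if_neg hle]
    -- B's loop body, guards folded away, is "append the row block"
    have hfun :
        (fun (out : List Int) (r : Int) =>
          let lo := max left (r * n) - r * n
          let hi := min right (r * n + n - 1) - r * n
          let flatEnd := min hi r
          let out1 := if lo ≤ flatEnd then out ++ List.replicate (flatEnd - lo + 1).toNat (r + 1) else out
          let rampStart := max lo (r + 1)
          if rampStart ≤ hi then out1 ++ PySem.List.pyRange (rampStart + 1) (hi + 2) 1 else out1)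
        = (fun (out : List Int) (r : Int) => out ++ pvBlk n left right r) := by
      funext out r
      unfold pvBlk
      simp only
      by_cases hflat : max left (r * n) - r * n ≤ min (min right (r * n + n - 1) - r * n) r <;>
        by_cases hramp : max (max left (r * n) - r * n) (r + 1) ≤ min right (r * n + n - 1) - r * n <;>
        [simp [hflat, hramp, List.append_assoc];
         (rw [show PySem.List.pyRange (max (max left (r * n) - r * n) (r + 1) + 1) (min right (r * n + n - 1) - r * n + 2) 1 = [] from PySem.List.pyRange_one_eq_nil (by omega)]; simp [hflat, hramp]);
         (rw [show (min (min right (r * n + n - 1) - r * n) r - (max left (r * n) - r * n) + 1).toNat = 0 by omega]; simp [hflat, hramp]);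
         (rw [show PySem.List.pyRange (max (max left (r * n) - r * n) (r + 1) + 1) (min right (r * n + n - 1) - r * n + 2) 1 = [] from PySem.List.pyRange_one_eq_nil (by omega),
              show (min (min right (r * n + n - 1) - r * n) r - (max left (r * n) - r * n) + 1).toNat = 0 by omega]; simp [hflat, hramp])]
    rw [hfun, PySem.List.foldl_append_eq_flatMap]
    rw [rows_decomp n right hn (PySem.Int.floordiv right n - PySem.Int.floordiv left n).toNat left (by omega) rfl]
    simp
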